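-- pv_equiv track=rewrite | github.com/waterloo-rocketry/OpenThrust | getRPA.py | parseRPA
-- ===== SOURCE A (Python) =====
-- def parseRPA(outputData):
--     # Create a dictionary containing all values from the RPA output
--     values = {}
--     # Exclude some lines that are outputted by the RPA library but don't contain useful information
--     exclude = ["ERROR", "WARNING", "Case name"]
--     excludeSubsection = ["Combustion composition"]
--     # Split the string fed in at the newline characters, creating an array of strings
--     outputData = outputData.splitlines()
--     # Declare some variables that will be used further down
--     currentSection = None
--     headerTitle = None
--     newSection = False
--     header = False
--     units = False
--     separationCount = 0
--     # Iterate through each line of the data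
--     for line in outputData:
--         # Ignore any lines that are empty or include any of the excluded markers
--         if len(line.strip()) > 0 and not any(word in line for word in exclude):
--             # RPA uses a line of '*'s before and after the title of each main section
--             if '*' in line.strip():
--                 # If the a new section was not already opened, a line of '*'s indicates the beginning of a new section
--                 if not newSection:
--                     newSection = True
--                     header = False
--                     separationCount = 0
--                 # Otherwise the line indicates the end of a new section
--                 else:
--                     newSection = False
--                 continue
--             # If a new section was opened but not closed yet, this line is the name of the section. Introduce it as a
--             # key for an empty dictionary within the main dictionary
--             if newSection:
--                 currentSection = line.strip()
--                 values[currentSection] = {}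
--                 continue
--             # If the new section has been closed but header has not yet been set, this line is a header for a subsection
--             if not header:
--                 header = True
--                 headerTitle = line.strip()[:-1]
--                 continue
--             # RPA uses a line of '--'s to delineate subsections and column titles
--             if "--" in line.strip():
--                 if header and separationCount < 2:
--                     separationCount += 1
--                     # If this is the first line of '--'s, a header was already defined, and the header is not
--                     # 'Combustion parameters' (the only subsection to break this rule), the lines until the next line
--                     # of '--'s is units and/or the title of columns. Otherwise it is not, make sure units is set to
--                     # false
--                     if separationCount == 1 and not "Combustion parameters" in headerTitle:
--                         units = True
--                     else:
--                         units = False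
--                 # Otherwise this is indicating the end of a subsection, reset the separation count and set header to
--                 # false
--                 else:
--                     separationCount = 0
--                     header = False
--                 continue
--             # If none of the header title is in the list of excluded markers and the units flag has not been set,
--             # this is a relevant value that needs to be added to the subsection dictionary
--             elif not any(section in headerTitle for section in excludeSubsection) and not units:
--                 # Some lines separate the parameter and value by a ':', if so split across this and write the parameter
--                 # and value into the current subsection dictionary
--                 if ":" in line:
--                     newEntry = line.split(":")
--                     values[currentSection][newEntry[0].strip()] = [l.strip() for l in newEntry[1].split()]
--                 # Otherwise the parameter and value are only split by whitespace, split the line and write the parameter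
--                 # and value into the current subsection dictionary
--                 else:
--                     newEntry = [l.strip() for l in line.split()]
--                     # If the first value in newEntry is a number, don't include this line (just unit conversion of
--                     # previous entry)
--                     try:
--                         float(newEntry[0])
--                     except ValueError:
--                         values[currentSection][newEntry[0]] = newEntry[1:]
--     # Return the completed dictionary of values
--     return values
-- ===== SOURCE B (Python) =====
-- # B: pre-filters irrelevant lines, then an index-driven recursive-descent style parser
-- # (star-banner groups consumed with lookahead, one helper per subsection) instead of
-- # A's single loop over boolean flags.
--
-- def _is_float(tok):
--     try:
--         float(tok)
--         return True
--     except ValueError: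
--         return False
--
--
-- def _add_entry(values, current, line):
--     # One value line: colon form, or whitespace form with the float-skip rule.
--     if ":" in line:
--         parts = line.split(":")
--         values[current][parts[0].strip()] = parts[1].split()
--     else:
--         parts = line.split()
--         if not _is_float(parts[0]):
--             values[current][parts[0]] = parts[1:]
--
--
-- def _subsection(lines, i, n, values, current, units):
--     # Parse one subsection starting at its header line; return (next index, units flag).
--     title = lines[i].strip()[:-1]
--     i += 1
--     seps = 0
--     while i < n:
--         s = lines[i].strip()
--         if '*' in s:
--             return i, units
--         if "--" in s:
--             if seps >= 2:
--                 return i + 1, units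
--             seps += 1
--             units = seps == 1 and "Combustion parameters" not in title
--         elif not units and "Combustion composition" not in title:
--             _add_entry(values, current, lines[i])
--         i += 1
--     return i, units
--
--
-- def parseRPA(outputData):
--     exclude = ("ERROR", "WARNING", "Case name")
--     lines = [ln for ln in outputData.splitlines()
--              if len(ln.strip()) > 0 and not any(w in ln for w in exclude)]
--     values = {}
--     current = None
--     units = False
--     i, n = 0, len(lines)
--     while i < n:
--         if '*' in lines[i].strip():
--             # star banner: every line up to the closing banner names a (new) section
--             i += 1
--             while i < n and '*' not in lines[i].strip():
--                 current = lines[i].strip()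
--                 values[current] = {}
--                 i += 1
--             i += 1
--         else:
--             i, units = _subsection(lines, i, n, values, current, units)
--     return values
-- ===== Notes on version B (the rewrite author's own statement) =====
-- stated objective: alternative
-- what changed: A is one loop over every line driven by five mutable flags (newSection/header/units/separationCount); B first filters out blank/excluded lines and then runs a recursive-descent parser with one routine per construct: a star-banner lookahead that consumes the section-name group, and a per-subsection routine that tracks only its own separator count, with the value-line parsing factored into a helper.
-- outside the precondition, e.g. on parseRPA('a\n--\nx'): A returns {}, B returns {}; on parseRPA('*\n*'): A returns {}, B returns {}
import Mathlib
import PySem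

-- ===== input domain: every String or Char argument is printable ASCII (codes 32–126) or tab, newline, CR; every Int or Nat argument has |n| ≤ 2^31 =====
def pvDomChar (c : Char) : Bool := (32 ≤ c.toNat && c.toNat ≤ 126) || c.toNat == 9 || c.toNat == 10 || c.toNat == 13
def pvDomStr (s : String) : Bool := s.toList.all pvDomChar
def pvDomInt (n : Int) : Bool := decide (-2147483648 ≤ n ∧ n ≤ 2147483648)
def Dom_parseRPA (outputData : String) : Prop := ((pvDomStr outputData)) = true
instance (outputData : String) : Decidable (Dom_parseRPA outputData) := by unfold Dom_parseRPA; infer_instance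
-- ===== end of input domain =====

-- B re-decomposes A's flag-driven line loop into a pre-filter plus a recursive-descent
-- parser (star-banner groups and one helper per subsection); same cost, clearer structure.

-- ===== shared primitive helpers (Python built-in semantics used by BOTH programs) =====

-- 'len(line.strip()) > 0 and not any(word in line for word in exclude)' (both programs filter on it)
def pvKeep (l : String) : Bool :=
  decide (0 < PySem.Str.len (PySem.Str.strip l)) &&
  !(["ERROR", "WARNING", "Case name"].any (fun w => PySem.Str.isIn w l))

-- hand-port of float(tok) acceptance ('try: float(...) except ValueError'), exact on the
-- whitespace-free ASCII tokens produced by str.split() (the only strings it receives here)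
def pvDigitpartAux : List Char → Bool
  | [] => true
  | '_' :: r =>
    match r with
    | [] => false
    | d :: r' => d.isDigit && pvDigitpartAux r'
  | c :: r => c.isDigit && pvDigitpartAux r

def pvDigitpart : List Char → Bool
  | [] => false
  | c :: r => c.isDigit && pvDigitpartAux r

def pvStripSign : List Char → List Char
  | [] => []
  | c :: r => if c = '+' || c = '-' then r else c :: r

def pvSplitAtChar (e : Char) : List Char → List Char × Option (List Char)
  | [] => ([], none)
  | c :: r =>
    if c = e then ([], some r)
    else
      let p := pvSplitAtChar e r
      (c :: p.1, p.2)

def pvMantOk (m : List Char) : Bool :=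
  match pvSplitAtChar '.' m with
  | (a, some b) =>
    !(a.isEmpty && b.isEmpty) && (a.isEmpty || pvDigitpart a) && (b.isEmpty || pvDigitpart b)
  | (a, none) => pvDigitpart a

def pvIsFloatTok (tok : String) : Bool :=
  let cs := pvStripSign (tok.toList.map PySem.Chars.lowerChar)
  if cs = "inf".toList || cs = "infinity".toList || cs = "nan".toList then true
  else
    match pvSplitAtChar 'e' cs with
    | (m, some e) => pvMantOk m && pvDigitpart (pvStripSign e)
    | (m, none) => pvMantOk m

-- ===== PORT A =====

structure PAState where
  vals : PySem.Dict String (PySem.Dict String (List String))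
  cur : Option String
  title : Option String
  newSec : Bool
  header : Bool
  units : Bool
  sc : Int

-- the body of A's loop for a line that passes the filter
def pvCoreA (st : PAState) (line : String) : PAState :=
  let t := PySem.Str.strip line
  if PySem.Str.isIn "*" t then
    if !st.newSec then
      { st with
        newSec := true
        header := false
        sc := 0 }
    else { st with newSec := false }
  else if st.newSec then
    { st with
      cur := some t
      vals := st.vals.insert t PySem.Dict.empty }
  else if !st.header then
    { st with
      header := true
      title := some (PySem.Str.slice t none (some (-1))) }
  else if PySem.Str.isIn "--" t then
    if st.header && decide (st.sc < 2) then
      { st with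
        sc := st.sc + 1
        units := (st.sc + 1 == 1) &&
          !(PySem.Str.isIn "Combustion parameters" (st.title.getD "")) }
    else
      { st with
        sc := 0
        header := false }
  else if !(["Combustion composition"].any (fun s => PySem.Str.isIn s (st.title.getD ""))) &&
          !st.units then
    if PySem.Str.isIn ":" line then
      let ne := (PySem.Str.split? line ":").getD []
      let vals' := st.vals.modify (st.cur.getD "") PySem.Dict.empty
        (fun sub => sub.insert (PySem.Str.strip ((PySem.List.pyGet? ne 0).getD ""))
          ((PySem.Str.split₀ ((PySem.List.pyGet? ne 1).getD "")).map PySem.Str.strip))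
      { st with vals := vals' }
    else
      let ne := (PySem.Str.split₀ line).map PySem.Str.strip
      if pvIsFloatTok ((PySem.List.pyGet? ne 0).getD "") then st
      else
        let vals' := st.vals.modify (st.cur.getD "") PySem.Dict.empty
          (fun sub => sub.insert ((PySem.List.pyGet? ne 0).getD "")
            (PySem.List.slice ne (some 1) none))
        { st with vals := vals' }
  else st

def pvStepA (st : PAState) (line : String) : PAState :=
  if pvKeep line then pvCoreA st line else st

def parseRPA (outputData : String) : List (String × List (String × List String)) :=
  let fin := (PySem.Str.splitlines outputData).foldl pvStepA
    ⟨PySem.Dict.empty, none, none, false, false, false, 0⟩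
  fin.vals.items.map (fun p => (p.1, p.2.items))

-- ===== PORT B =====

-- '_add_entry(values, current, line)'
def pvAddEntry (vals : PySem.Dict String (PySem.Dict String (List String)))
    (cur : Option String) (line : String) :
    PySem.Dict String (PySem.Dict String (List String)) :=
  if PySem.Str.isIn ":" line then
    let parts := (PySem.Str.split? line ":").getD []
    vals.modify (cur.getD "") PySem.Dict.empty
      (fun sub => sub.insert (PySem.Str.strip ((PySem.List.pyGet? parts 0).getD ""))
        ((PySem.Str.split₀ ((PySem.List.pyGet? parts 1).getD "")).map PySem.Str.strip))
  else
    let parts := (PySem.Str.split₀ line).map PySem.Str.strip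
    if pvIsFloatTok ((PySem.List.pyGet? parts 0).getD "") then vals
    else
      vals.modify (cur.getD "") PySem.Dict.empty
        (fun sub => sub.insert ((PySem.List.pyGet? parts 0).getD "")
          (PySem.List.slice parts (some 1) none))

mutual
-- the top-level 'while i < n' loop of B
def pvMainB (ls : List String) (vals : PySem.Dict String (PySem.Dict String (List String)))
    (cur : Option String) (units : Bool) :
    PySem.Dict String (PySem.Dict String (List String)) :=
  match ls with
  | [] => vals
  | l :: rest =>
    if PySem.Str.isIn "*" (PySem.Str.strip l) then pvStarB rest vals cur units
    else pvSubB rest vals cur units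
      (PySem.Str.slice (PySem.Str.strip l) none (some (-1))) 0

-- the inner star-banner lookahead loop of B
def pvStarB (ls : List String) (vals : PySem.Dict String (PySem.Dict String (List String)))
    (cur : Option String) (units : Bool) :
    PySem.Dict String (PySem.Dict String (List String)) :=
  match ls with
  | [] => vals
  | l :: rest =>
    let t := PySem.Str.strip l
    if PySem.Str.isIn "*" t then pvMainB rest vals cur units
    else pvStarB rest (vals.insert t PySem.Dict.empty) (some t) units

-- '_subsection' (its trailing return-to-main dispatch is inlined: on '*' the main loop
-- would immediately take its star branch, on the closing '--' it advances past the line)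
def pvSubB (ls : List String) (vals : PySem.Dict String (PySem.Dict String (List String)))
    (cur : Option String) (units : Bool) (title : String) (sc : Int) :
    PySem.Dict String (PySem.Dict String (List String)) :=
  match ls with
  | [] => vals
  | l :: rest =>
    let t := PySem.Str.strip l
    if PySem.Str.isIn "*" t then pvStarB rest vals cur units
    else if PySem.Str.isIn "--" t then
      if decide (2 ≤ sc) then pvMainB rest vals cur units
      else pvSubB rest vals cur
        ((sc + 1 == 1) && !(PySem.Str.isIn "Combustion parameters" title)) title (sc + 1)
    else if !units && !(PySem.Str.isIn "Combustion composition" title) then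
      pvSubB rest (pvAddEntry vals cur l) cur units title sc
    else pvSubB rest vals cur units title sc
end

def parseRPA_alt (outputData : String) : List (String × List (String × List String)) :=
  let lines := (PySem.Str.splitlines outputData).filter pvKeep
  (pvMainB lines PySem.Dict.empty none false).items.map (fun p => (p.1, p.2.items))

-- ===== PRECONDITION & SPEC =====

-- Pre_ excludes inputs on which A reaches a value line before any section name has been
-- set and raises KeyError (values[None]), by requiring the standard RPA shape: the first
-- relevant (non-blank, non-excluded) line is a '*' banner and the second is a section
-- name; this also excludes some degenerate inputs A happens to survive (e.g. ones whose
-- early value lines are all float-skipped), on which B returns the same dict anyway.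
def Pre_parseRPA (outputData : String) : Prop :=
  let r := (PySem.Str.splitlines outputData).filter pvKeep
  r.length ≤ 1 ∨
    (PySem.Str.isIn "*" (PySem.Str.strip (r.headD "")) = true ∧
     PySem.Str.isIn "*" (PySem.Str.strip ((r.drop 1).headD "")) = false)
instance (outputData : String) : Decidable (Pre_parseRPA outputData) := by
  unfold Pre_parseRPA; infer_instance

def pvWitness_parseRPA : String :=
  "***\n Thermodynamic properties\n***\nChamber conditions:\n--\np   1.0 MPa\n--\nT: 300 K\n--"

def Spec_parseRPA (outputData : String) (out : List (String × List (String × List String))) : Prop := out = parseRPA_alt outputData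
instance (outputData : String) (out : List (String × List (String × List String))) : Decidable (Spec_parseRPA outputData out) := by unfold Spec_parseRPA; infer_instance

-- ===== CLAIM (what is proved, stated in full; the proofs are below) =====
def Claim_equal_parseRPA : Prop := ∀ (outputData : String), Dom_parseRPA outputData → Pre_parseRPA outputData → Spec_parseRPA outputData (parseRPA outputData)

-- ===== LEMMAS AND PROOFS =====

-- the three loop modes of A's state machine, tied to B's three parsers
theorem pvTri (ls : List String) :
    (∀ vals cur title units,
      (ls.foldl pvCoreA ⟨vals, cur, title, false, false, units, 0⟩).vals =
        pvMainB ls vals cur units) ∧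
    (∀ vals cur title units,
      (ls.foldl pvCoreA ⟨vals, cur, title, true, false, units, 0⟩).vals =
        pvStarB ls vals cur units) ∧
    (∀ vals cur t units sc,
      (ls.foldl pvCoreA ⟨vals, cur, some t, false, true, units, sc⟩).vals =
        pvSubB ls vals cur units t sc) := by
  induction ls with
  | nil =>
    exact ⟨fun _ _ _ _ => by simp [pvMainB], fun _ _ _ _ => by simp [pvStarB],
      fun _ _ _ _ _ => by simp [pvSubB]⟩
  | cons l rest ih =>
    obtain ⟨ihM, ihS, ihU⟩ := ih
    refine ⟨?_, ?_, ?_⟩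
    · intro vals cur title units
      rw [List.foldl_cons]
      by_cases h1 : PySem.Str.isIn "*" (PySem.Str.strip l) = true
      all_goals try simp at h1
      · rw [show pvCoreA ⟨vals, cur, title, false, false, units, 0⟩ l =
            (⟨vals, cur, title, true, false, units, 0⟩ : PAState) from by
              simp [pvCoreA, h1], ihS]
        simp [pvMainB, h1]
      · rw [show pvCoreA ⟨vals, cur, title, false, false, units, 0⟩ l =
            (⟨vals, cur, some (PySem.Str.slice (PySem.Str.strip l) none (some (-1))),
              false, true, units, 0⟩ : PAState) from by
              simp [pvCoreA, h1], ihU]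
        simp [pvMainB, h1]
    · intro vals cur title units
      rw [List.foldl_cons]
      by_cases h1 : PySem.Str.isIn "*" (PySem.Str.strip l) = true
      all_goals try simp at h1
      · rw [show pvCoreA ⟨vals, cur, title, true, false, units, 0⟩ l =
            (⟨vals, cur, title, false, false, units, 0⟩ : PAState) from by
              simp [pvCoreA, h1], ihM]
        simp [pvStarB, h1]
      · rw [show pvCoreA ⟨vals, cur, title, true, false, units, 0⟩ l =
            (⟨vals.insert (PySem.Str.strip l) PySem.Dict.empty,
              some (PySem.Str.strip l), title, true, false, units, 0⟩ : PAState) from by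
              simp [pvCoreA, h1], ihS]
        simp [pvStarB, h1]
    · intro vals cur t units sc
      rw [List.foldl_cons]
      by_cases h1 : PySem.Str.isIn "*" (PySem.Str.strip l) = true
      all_goals try simp at h1
      · rw [show pvCoreA ⟨vals, cur, some t, false, true, units, sc⟩ l =
            (⟨vals, cur, some t, true, false, units, 0⟩ : PAState) from by
              simp [pvCoreA, h1], ihS]
        simp [pvSubB, h1]
      · by_cases h2 : PySem.Str.isIn "--" (PySem.Str.strip l) = true
        all_goals try simp at h2
        · by_cases hsc : sc < 2
          · rw [show pvCoreA ⟨vals, cur, some t, false, true, units, sc⟩ l =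
                (⟨vals, cur, some t, false, true,
                  ((sc + 1 == 1) && !(PySem.Str.isIn "Combustion parameters" t)),
                  sc + 1⟩ : PAState) from by
                  simp [pvCoreA, h1, h2, hsc], ihU]
            have h3 : ¬ ((2:Int) ≤ sc) := by omega
            simp [pvSubB, h1, h2, h3]
          · have h3 : (2:Int) ≤ sc := by omega
            rw [show pvCoreA ⟨vals, cur, some t, false, true, units, sc⟩ l =
                (⟨vals, cur, some t, false, false, units, 0⟩ : PAState) from by
                  simp [pvCoreA, h1, h2, hsc], ihM]
            simp [pvSubB, h1, h2, h3]
        · by_cases hu : units = true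
          · rw [show pvCoreA ⟨vals, cur, some t, false, true, units, sc⟩ l =
                (⟨vals, cur, some t, false, true, units, sc⟩ : PAState) from by
                  simp [pvCoreA, h1, h2, hu], ihU]
            simp [pvSubB, h1, h2, hu]
          · by_cases hcc : PySem.Str.isIn "Combustion composition" t = true
            all_goals try simp at hcc
            · rw [show pvCoreA ⟨vals, cur, some t, false, true, units, sc⟩ l =
                  (⟨vals, cur, some t, false, true, units, sc⟩ : PAState) from by
                    simp [pvCoreA, h1, h2, hcc], ihU]
              simp [pvSubB, h1, h2, hu, hcc]
            · by_cases hcol : PySem.Str.isIn ":" l = true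
              all_goals try simp at hcol
              · rw [show pvCoreA ⟨vals, cur, some t, false, true, units, sc⟩ l =
                    (⟨pvAddEntry vals cur l, cur, some t, false, true, units, sc⟩ : PAState) from by
                      simp [pvCoreA, pvAddEntry, h1, h2, hu, hcc, hcol], ihU]
                simp [pvSubB, h1, h2, hu, hcc]
              · by_cases hfl : pvIsFloatTok
                    ((PySem.List.pyGet? ((PySem.Str.split₀ l).map PySem.Str.strip) 0).getD "") = true
                all_goals try simp at hfl
                · rw [show pvCoreA ⟨vals, cur, some t, false, true, units, sc⟩ l =
                      (⟨vals, cur, some t, false, true, units, sc⟩ : PAState) from by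
                        simp [pvCoreA, h1, h2, hu, hcc, hcol, hfl], ihU]
                  simp [pvSubB, pvAddEntry, h1, h2, hu, hcc, hcol, hfl]
                · rw [show pvCoreA ⟨vals, cur, some t, false, true, units, sc⟩ l =
                      (⟨pvAddEntry vals cur l, cur, some t, false, true, units, sc⟩ : PAState) from by
                        simp [pvCoreA, pvAddEntry, h1, h2, hu, hcc, hcol, hfl], ihU]
                  simp [pvSubB, h1, h2, hu, hcc]

theorem parseRPA_eq_alt (outputData : String) : parseRPA outputData = parseRPA_alt outputData := by
  have hstep : pvStepA = (fun acc x => if pvKeep x = true then pvCoreA acc x else acc) := rfl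
  simp only [parseRPA, parseRPA_alt]
  rw [hstep, PySem.List.foldl_if_eq_foldl_filter,
    (pvTri ((PySem.Str.splitlines outputData).filter pvKeep)).1]

-- ===== VERDICT (by name: the statement is the Claim_ definition above) =====
theorem parseRPA_spec : Claim_equal_parseRPA := by
  intro od _ _
  unfold Spec_parseRPA
  exact parseRPA_eq_alt od
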